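-- pv_equiv track=rewrite | github.com/thepratholic/Competitive-Programming | LeetCode/Weekly Contest 486/Rotate Non Negative Elements.py | rotateElements
-- ===== SOURCE A (Python) =====
-- from typing import List
--
-- def rotateElements(nums: List[int], k: int) -> List[int]:
--     n = len(nums)
--
--     pos = []
--     vals = []
--     for i, val in enumerate(nums):
--         if val >= 0:
--             pos.append(i)
--             vals.append(val)
--
--     m = len(vals)
--     if m == 0:
--         return nums
--
--     k = k % m
--     vals = vals[k:] + vals[:k]
--
--     res = nums[:]
--     for i, val in zip(pos, vals):
--         res[i] = val
--
--     return res
-- ===== SOURCE B (Python) =====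
-- from typing import List
--
-- def rotateElements(nums: List[int], k: int) -> List[int]:
--     pos = [i for i, v in enumerate(nums) if v >= 0]
--     m = len(pos)
--     if m == 0:
--         return nums
--     k %= m
--     res = nums[:]
--
--     def reverse(lo, hi):
--         while lo < hi:
--             i, j = pos[lo], pos[hi]
--             res[i], res[j] = res[j], res[i]
--             lo += 1
--             hi -= 1
--
--     reverse(0, k - 1)
--     reverse(k, m - 1)
--     reverse(0, m - 1)
--     return res
-- ===== Notes on version B (the rewrite author's own statement) =====
-- stated objective: alternative
-- what changed: Instead of slicing the collected non-negative values into a rotated list and scattering them back over a zip, B rotates the non-negative values in place on a copy with the classic three-reversal trick (reverse first k, reverse rest, reverse all), swapping through the position index list.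
import Mathlib
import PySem

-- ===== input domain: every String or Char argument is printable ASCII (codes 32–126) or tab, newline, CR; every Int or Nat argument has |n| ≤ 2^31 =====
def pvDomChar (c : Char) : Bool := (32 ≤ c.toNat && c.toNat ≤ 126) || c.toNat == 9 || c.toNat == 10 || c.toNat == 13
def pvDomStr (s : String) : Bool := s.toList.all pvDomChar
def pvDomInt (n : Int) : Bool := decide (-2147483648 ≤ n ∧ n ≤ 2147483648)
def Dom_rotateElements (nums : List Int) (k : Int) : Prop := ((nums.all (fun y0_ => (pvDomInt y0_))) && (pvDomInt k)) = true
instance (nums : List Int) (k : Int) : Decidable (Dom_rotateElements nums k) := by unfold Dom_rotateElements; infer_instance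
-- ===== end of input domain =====

-- B replaces A's slice-rotation + zip-scatter with an in-place three-reversal rotation
-- of the non-negative values on a copy, via the collected position list (alternative
-- decomposition; A's `nums` is never mutated by either version).


-- ===== PORT A =====
-- literal transliteration of Source A: collect (pos, vals) of the non-negative
-- elements, rotate vals left by k % m via slices, scatter back over zip(pos, vals').
def rotateElements (nums : List Int) (k : Int) : List Int :=
  let pv := (PySem.List.enumerate nums).foldl
    (fun (pv : List Int × List Int) iv =>
      if iv.2 ≥ 0 then (pv.1 ++ [iv.1], pv.2 ++ [iv.2]) else pv)
    (([] : List Int), ([] : List Int))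
  let pos := pv.1
  let vals := pv.2
  let m : Int := PySem.List.len vals
  if m = 0 then nums
  else
    let k' := PySem.Int.mod k m
    let vals' := PySem.List.slice vals (some k') none ++ PySem.List.slice vals none (some k')
    -- res = nums[:] then res[i] = val for (i, val) in zip(pos, vals'); i is always in range
    (pos.zip vals').foldl (fun res iv => PySem.List.pySetD res iv.1 iv.2) nums

-- ===== PORT B =====
-- while lo < hi: swap res[pos[lo]], res[pos[hi]]; lo += 1; hi -= 1
-- (lo, hi as Nat: B only ever calls reverse with bounds ≥ -1, and at -1 the Python
-- loop body never runs, exactly as at the Nat value 0 here; indices are in range.)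
def pvRevLoop (pos : List Int) (res : List Int) (lo hi : Nat) : List Int :=
  if lo < hi then
    let i := pos.getD lo 0
    let j := pos.getD hi 0
    let a := PySem.List.pyGetD res j 0
    let b := PySem.List.pyGetD res i 0
    pvRevLoop pos (PySem.List.pySetD (PySem.List.pySetD res i a) j b) (lo + 1) (hi - 1)
  else res
termination_by hi - lo

-- literal transliteration of Source B: comprehension for pos, then three reversal
-- passes on a copy of nums (k %= m gives a value in [0, m), hence the Nat k').
def rotateElements_alt (nums : List Int) (k : Int) : List Int :=
  let pos := (PySem.List.enumerate nums).filterMap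
    (fun iv => if iv.2 ≥ 0 then some iv.1 else none)
  let m := pos.length
  if m = 0 then nums
  else
    let k' := (PySem.Int.mod k (m : Int)).toNat
    let r1 := pvRevLoop pos nums 0 (k' - 1)
    let r2 := pvRevLoop pos r1 k' (m - 1)
    pvRevLoop pos r2 0 (m - 1)

-- ===== PRECONDITION & SPEC =====
def Spec_rotateElements (nums : List Int) (k : Int) (out : List Int) : Prop := out = rotateElements_alt nums k
instance (nums : List Int) (k : Int) (out : List Int) : Decidable (Spec_rotateElements nums k out) := by unfold Spec_rotateElements; infer_instance

-- ===== CLAIM (what is proved, stated in full; the proofs are below) =====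
def Claim_equal_rotateElements : Prop := ∀ (nums : List Int) (k : Int), Dom_rotateElements nums k → Spec_rotateElements nums k (rotateElements nums k)

-- ===== LEMMAS AND PROOFS =====

-- the (index, value) pairs of the non-negative elements, indices starting at s
def pvPairsN (nums : List Int) (s : Nat) : List (Nat × Int) :=
  match nums with
  | [] => []
  | v :: t => if v ≥ 0 then (s, v) :: pvPairsN t (s + 1) else pvPairsN t (s + 1)

-- scatter vs over positions ps into r
def pvScatterZ (r : List Int) (ps : List Nat) (vs : List Int) : List Int :=
  (ps.zip vs).foldl (fun r iv => r.set iv.1 iv.2) r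

-- pure-list analogue of pvRevLoop: reverse the segment [lo, hi] of vs by swaps
def pvSwapSeg (vs : List Int) (lo hi : Nat) : List Int :=
  if lo < hi then
    pvSwapSeg ((vs.set lo (vs.getD hi 0)).set hi (vs.getD lo 0)) (lo + 1) (hi - 1)
  else vs
termination_by hi - lo

theorem pvPairsN_A (nums : List Int) (s : Nat) (acc1 acc2 : List Int) :
    (PySem.List.enumerate nums (s : Int)).foldl
      (fun (pv : List Int × List Int) iv =>
        if iv.2 ≥ 0 then (pv.1 ++ [iv.1], pv.2 ++ [iv.2]) else pv)
      (acc1, acc2)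
    = (acc1 ++ (pvPairsN nums s).map (fun p => ((p.1 : Int))),
       acc2 ++ (pvPairsN nums s).map Prod.snd) := by
  induction nums generalizing s acc1 acc2 with
  | nil => simp [pvPairsN, PySem.List.enumerate_nil]
  | cons v t ih =>
    rw [PySem.List.enumerate_cons]
    have hs : (s : Int) + 1 = ((s + 1 : Nat) : Int) := by push_cast; ring
    rw [hs]
    simp only [List.foldl_cons, pvPairsN]
    by_cases hv : v ≥ 0
    · simp only [hv, ite_true, List.map_cons]
      rw [ih]
      simp
    · simp only [hv, ite_false]
      rw [ih]

theorem pvPairsN_B (nums : List Int) (s : Nat) :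
    (PySem.List.enumerate nums (s : Int)).filterMap
      (fun iv => if iv.2 ≥ 0 then some iv.1 else none)
    = (pvPairsN nums s).map (fun p => ((p.1 : Int))) := by
  induction nums generalizing s with
  | nil => simp [pvPairsN, PySem.List.enumerate_nil]
  | cons v t ih =>
    rw [PySem.List.enumerate_cons]
    have hs : (s : Int) + 1 = ((s + 1 : Nat) : Int) := by push_cast; ring
    rw [hs]
    simp only [List.filterMap_cons, pvPairsN]
    by_cases hv : v ≥ 0
    · simp only [hv, ite_true, List.map_cons]
      rw [ih]
    · simp only [hv, ite_false]
      rw [ih]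

theorem pvPairsN_bounds (nums : List Int) (s : Nat) :
    ∀ pv ∈ pvPairsN nums s, s ≤ pv.1 ∧ pv.1 < s + nums.length ∧
      nums[pv.1 - s]? = some pv.2 := by
  induction nums generalizing s with
  | nil => simp [pvPairsN]
  | cons v t ih =>
    intro pv hpv
    rw [pvPairsN] at hpv
    have step : pv ∈ pvPairsN t (s + 1) →
        s ≤ pv.1 ∧ pv.1 < s + (v :: t).length ∧ (v :: t)[pv.1 - s]? = some pv.2 := by
      intro h
      obtain ⟨h1, h2, h3⟩ := ih (s + 1) pv h
      refine ⟨by omega, by simp only [List.length_cons]; omega, ?_⟩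
      have he : pv.1 - s = (pv.1 - (s + 1)) + 1 := by omega
      rw [he, List.getElem?_cons_succ]; exact h3
    by_cases hv : v ≥ 0
    · rw [if_pos hv] at hpv
      rcases List.mem_cons.mp hpv with h | h
      · subst h; simp
      · exact step h
    · rw [if_neg hv] at hpv
      exact step hpv

theorem pvPairsN_pairwise (nums : List Int) (s : Nat) :
    ((pvPairsN nums s).map Prod.fst).Pairwise (· < ·) := by
  induction nums generalizing s with
  | nil => simp [pvPairsN]
  | cons v t ih =>
    rw [pvPairsN]
    by_cases hv : v ≥ 0
    · rw [if_pos hv]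
      rw [List.map_cons, List.pairwise_cons]
      refine ⟨?_, ih (s + 1)⟩
      intro q hq
      obtain ⟨pv, hpv, hq'⟩ := List.mem_map.mp hq
      have := (pvPairsN_bounds t (s + 1) pv hpv).1
      subst hq'; simpa using by omega
    · rw [if_neg hv]; exact ih (s + 1)

theorem pvPairsN_nodup (nums : List Int) (s : Nat) :
    ((pvPairsN nums s).map Prod.fst).Nodup :=
  ((pvPairsN_pairwise nums s).imp (fun h => by omega)).nodup

theorem pvScatterZ_cons (r : List Int) (p : Nat) (pt : List Nat) (v : Int) (vt : List Int) :
    pvScatterZ r (p :: pt) (v :: vt) = pvScatterZ (r.set p v) pt vt := rfl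

theorem pvScatterZ_notmem (r : List Int) (ps : List Nat) (vs : List Int) (q : Nat)
    (h : q ∉ ps) : (pvScatterZ r ps vs)[q]? = r[q]? := by
  induction ps generalizing r vs with
  | nil => simp [pvScatterZ]
  | cons p pt ih =>
    cases vs with
    | nil => simp [pvScatterZ]
    | cons v vt =>
      simp only [List.mem_cons, not_or] at h
      rw [pvScatterZ_cons, ih (r.set p v) vt h.2, List.getElem?_set_ne (by omega)]

theorem pvScatterZ_set_notmem (r : List Int) (ps : List Nat) (vs : List Int) (q : Nat)
    (x : Int) (h : q ∉ ps) :
    (pvScatterZ r ps vs).set q x = pvScatterZ (r.set q x) ps vs := by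
  induction ps generalizing r vs with
  | nil => simp [pvScatterZ]
  | cons p pt ih =>
    cases vs with
    | nil => simp [pvScatterZ]
    | cons v vt =>
      simp only [List.mem_cons, not_or] at h
      rw [pvScatterZ_cons, pvScatterZ_cons, ih (r.set p v) vt h.2,
        List.set_comm _ _ (show q ≠ p by omega)]

theorem pvScatterZ_read (r : List Int) (ps : List Nat) (vs : List Int)
    (hnd : ps.Nodup) (i : Nat) (hi : i < ps.length) (hiv : i < vs.length)
    (hr : ps[i] < r.length) :
    (pvScatterZ r ps vs)[ps[i]]? = some vs[i] := by
  induction ps generalizing r vs i with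
  | nil => simp at hi
  | cons p pt ih =>
    cases vs with
    | nil => simp at hiv
    | cons v vt =>
      rw [List.nodup_cons] at hnd
      rw [pvScatterZ_cons]
      cases i with
      | zero =>
        simp only [List.getElem_cons_zero] at hr ⊢
        rw [pvScatterZ_notmem _ _ _ _ hnd.1,
          List.getElem?_set_self (by simpa using hr)]
      | succ n =>
        simp only [List.getElem_cons_succ] at hr ⊢
        exact ih (r.set p v) vt hnd.2 n (by simpa using hi) (by simpa using hiv)
          (by simpa using hr)

theorem pvScatterZ_write (r : List Int) (ps : List Nat) (vs : List Int)
    (hnd : ps.Nodup) (i : Nat) (hi : i < ps.length) (hiv : i < vs.length) (x : Int) :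
    (pvScatterZ r ps vs).set ps[i] x = pvScatterZ r ps (vs.set i x) := by
  induction ps generalizing r vs i with
  | nil => simp at hi
  | cons p pt ih =>
    cases vs with
    | nil => simp at hiv
    | cons v vt =>
      rw [List.nodup_cons] at hnd
      cases i with
      | zero =>
        simp only [List.getElem_cons_zero, List.set_cons_zero]
        rw [pvScatterZ_cons, pvScatterZ_cons,
          pvScatterZ_set_notmem _ _ _ _ _ hnd.1, List.set_set]
      | succ n =>
        simp only [List.getElem_cons_succ, List.set_cons_succ]
        rw [pvScatterZ_cons, pvScatterZ_cons]
        exact ih (r.set p v) vt hnd.2 n (by simpa using hi) (by simpa using hiv)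

theorem pvScatterZ_self (r : List Int) (ps : List Nat) (vs : List Int)
    (h : ∀ i (h1 : i < ps.length) (h2 : i < vs.length), r[ps[i]]? = some vs[i]) :
    pvScatterZ r ps vs = r := by
  induction ps generalizing r vs with
  | nil => simp [pvScatterZ]
  | cons p pt ih =>
    cases vs with
    | nil => simp [pvScatterZ]
    | cons v vt =>
      rw [pvScatterZ_cons]
      have h0 := h 0 (by simp) (by simp)
      simp only [List.getElem_cons_zero] at h0
      have hplen : p < r.length := by
        rcases Nat.lt_or_ge p r.length with h' | h'
        · exact h'
        · rw [List.getElem?_eq_none_iff.mpr h'] at h0; cases h0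
      have hr : r.set p v = r := by
        apply List.ext_getElem?
        intro q
        by_cases hq : q = p
        · subst hq; rw [List.getElem?_set_self hplen]; exact h0.symm
        · rw [List.getElem?_set_ne (by omega)]
      rw [hr]
      exact ih r vt (fun i h1 h2 => by
        simpa using h (i + 1) (by simpa using Nat.succ_lt_succ h1)
          (by simpa using Nat.succ_lt_succ h2))

theorem pvSwapSeg_length (vs : List Int) (lo hi : Nat) :
    (pvSwapSeg vs lo hi).length = vs.length := by
  fun_induction pvSwapSeg vs lo hi with
  | case1 vs lo hi h ih => simpa using ih
  | case2 => rfl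

theorem pvSwapSeg_getElem?_aux (d : Nat) :
    ∀ (vs : List Int) (lo hi : Nat), hi - lo ≤ d → hi < vs.length → ∀ t,
      (pvSwapSeg vs lo hi)[t]? =
        if lo ≤ t ∧ t ≤ hi then vs[lo + hi - t]? else vs[t]? := by
  induction d with
  | zero =>
    intro vs lo hi hd hhi t
    rw [pvSwapSeg, if_neg (by omega)]
    split_ifs with h
    · congr 1; omega
    · rfl
  | succ d ihd =>
    intro vs lo hi hd hhi t
    rw [pvSwapSeg]
    by_cases h : lo < hi
    · rw [if_pos h]
      have hlo : lo < vs.length := by omega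
      have hva : vs.getD hi 0 = vs[hi] := by
        rw [List.getD_eq_getElem?_getD, List.getElem?_eq_getElem hhi]; rfl
      have hvb : vs.getD lo 0 = vs[lo] := by
        rw [List.getD_eq_getElem?_getD, List.getElem?_eq_getElem hlo]; rfl
      rw [hva, hvb]
      have hlen : ((vs.set lo vs[hi]).set hi vs[lo]).length = vs.length := by simp
      have hv : ∀ u, ((vs.set lo vs[hi]).set hi vs[lo])[u]? =
          if u = hi then some vs[lo] else if u = lo then some vs[hi] else vs[u]? := by
        intro u
        by_cases h1 : u = hi
        · subst h1
          rw [if_pos rfl, List.getElem?_set_self (by simpa using hhi)]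
        · rw [if_neg h1, List.getElem?_set_ne (by omega)]
          by_cases h2 : u = lo
          · subst h2
            rw [if_pos rfl, List.getElem?_set_self hlo]
          · rw [if_neg h2, List.getElem?_set_ne (by omega)]
      rw [ihd _ _ _ (by omega) (by rw [hlen]; omega) t]
      by_cases hc : lo + 1 ≤ t ∧ t ≤ hi - 1
      · rw [if_pos hc, if_pos (show lo ≤ t ∧ t ≤ hi by omega),
          hv (lo + 1 + (hi - 1) - t),
          if_neg (show ¬ lo + 1 + (hi - 1) - t = hi by omega),
          if_neg (show ¬ lo + 1 + (hi - 1) - t = lo by omega)]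
        congr 1; omega
      · rw [if_neg hc, hv t]
        by_cases h1 : t = hi
        · rw [if_pos h1, if_pos (show lo ≤ t ∧ t ≤ hi by omega),
            List.getElem?_eq_getElem (show lo + hi - t < vs.length by omega)]
          congr 2; omega
        · rw [if_neg h1]
          by_cases h2 : t = lo
          · rw [if_pos h2, if_pos (show lo ≤ t ∧ t ≤ hi by omega),
              List.getElem?_eq_getElem (show lo + hi - t < vs.length by omega)]
            congr 2; omega
          · rw [if_neg h2, if_neg (show ¬ (lo ≤ t ∧ t ≤ hi) by omega)]
    · rw [if_neg h]
      split_ifs with hc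
      · congr 1; omega
      · rfl

theorem pvSwapSeg_getElem? (vs : List Int) (lo hi : Nat) (hhi : hi < vs.length) (t : Nat) :
    (pvSwapSeg vs lo hi)[t]? =
      if lo ≤ t ∧ t ≤ hi then vs[lo + hi - t]? else vs[t]? :=
  pvSwapSeg_getElem?_aux (hi - lo) vs lo hi (le_refl _) hhi t

theorem pvRevLoop_scatter_aux (d : Nat) :
    ∀ (r : List Int) (ps : List Nat) (vs : List Int), ps.Nodup →
      (∀ p ∈ ps, p < r.length) → vs.length = ps.length →
      ∀ (lo hi : Nat), hi - lo ≤ d → hi < ps.length →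
        pvRevLoop (ps.map (Nat.cast : Nat → Int)) (pvScatterZ r ps vs) lo hi
          = pvScatterZ r ps (pvSwapSeg vs lo hi) := by
  induction d with
  | zero =>
    intro r ps vs hnd hbd hlen lo hi hd hhi
    rw [pvRevLoop, if_neg (by omega), pvSwapSeg, if_neg (by omega)]
  | succ d ihd =>
    intro r ps vs hnd hbd hlen lo hi hd hhi
    rw [pvRevLoop, pvSwapSeg]
    by_cases h : lo < hi
    · rw [if_pos h, if_pos h]
      have hlo : lo < ps.length := by omega
      have hplo : ps[lo] < r.length := hbd _ (List.getElem_mem hlo)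
      have hphi : ps[hi] < r.length := hbd _ (List.getElem_mem hhi)
      have e1 : (ps.map (Nat.cast : Nat → Int)).getD lo 0 = ((ps[lo] : Int)) := by
        rw [List.getD_eq_getElem?_getD, List.getElem?_map, List.getElem?_eq_getElem hlo]; rfl
      have e2 : (ps.map (Nat.cast : Nat → Int)).getD hi 0 = ((ps[hi] : Int)) := by
        rw [List.getD_eq_getElem?_getD, List.getElem?_map, List.getElem?_eq_getElem hhi]; rfl
      have rdlo : (pvScatterZ r ps vs)[ps[lo]]? = some vs[lo] :=
        pvScatterZ_read r ps vs hnd lo hlo (by omega) hplo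
      have rdhi : (pvScatterZ r ps vs)[ps[hi]]? = some vs[hi] :=
        pvScatterZ_read r ps vs hnd hi hhi (by omega) hphi
      have ra : PySem.List.pyGetD (pvScatterZ r ps vs) ((ps[hi] : Int)) 0 = vs[hi] := by
        rw [PySem.List.pyGetD_natCast, List.getD_eq_getElem?_getD, rdhi]; rfl
      have rb : PySem.List.pyGetD (pvScatterZ r ps vs) ((ps[lo] : Int)) 0 = vs[lo] := by
        rw [PySem.List.pyGetD_natCast, List.getD_eq_getElem?_getD, rdlo]; rfl
      have hva : vs.getD hi 0 = vs[hi] := by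
        rw [List.getD_eq_getElem?_getD, List.getElem?_eq_getElem (by omega)]; rfl
      have hvb : vs.getD lo 0 = vs[lo] := by
        rw [List.getD_eq_getElem?_getD, List.getElem?_eq_getElem (by omega)]; rfl
      simp only [e1, e2, ra, rb, hva, hvb, PySem.List.pySetD_natCast]
      rw [pvScatterZ_write r ps vs hnd lo hlo (by omega),
        pvScatterZ_write r ps _ hnd hi hhi (by simp; omega)]
      exact ihd r ps _ hnd hbd (by simp [hlen]) (lo + 1) (hi - 1) (by omega) (by omega)
    · rw [if_neg h, if_neg h]

theorem pvRevLoop_scatter (r : List Int) (ps : List Nat) (vs : List Int)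
    (hnd : ps.Nodup) (hbd : ∀ p ∈ ps, p < r.length) (hlen : vs.length = ps.length)
    (lo hi : Nat) (hhi : hi < ps.length) :
    pvRevLoop (ps.map (Nat.cast : Nat → Int)) (pvScatterZ r ps vs) lo hi
      = pvScatterZ r ps (pvSwapSeg vs lo hi) :=
  pvRevLoop_scatter_aux (hi - lo) r ps vs hnd hbd hlen lo hi (le_refl _) hhi

theorem pvRotation (vs : List Int) (k : Nat) (hk : k < vs.length) :
    pvSwapSeg (pvSwapSeg (pvSwapSeg vs 0 (k - 1)) k (vs.length - 1)) 0 (vs.length - 1)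
      = vs.drop k ++ vs.take k := by
  have hm : 0 < vs.length := by omega
  have l1 : (pvSwapSeg vs 0 (k - 1)).length = vs.length := pvSwapSeg_length vs 0 (k - 1)
  have l2 : (pvSwapSeg (pvSwapSeg vs 0 (k - 1)) k (vs.length - 1)).length = vs.length := by
    rw [pvSwapSeg_length, l1]
  apply List.ext_getElem?
  intro t
  rw [pvSwapSeg_getElem? _ 0 (vs.length - 1) (by rw [l2]; omega) t]
  by_cases ht : t < vs.length
  · rw [if_pos (by omega),
      pvSwapSeg_getElem? _ k (vs.length - 1) (by rw [l1]; omega) _]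
    by_cases hu : t < vs.length - k
    · rw [if_pos (by omega),
        pvSwapSeg_getElem? vs 0 (k - 1) (by omega) _]
      by_cases hw : k + (vs.length - 1) - (0 + (vs.length - 1) - t) ≤ k - 1
      · rw [if_pos ⟨Nat.zero_le _, hw⟩,
          List.getElem?_append_left (by simp; omega), List.getElem?_drop]
        congr 1; omega
      · rw [if_neg (fun hc => hw hc.2),
          List.getElem?_append_left (by simp; omega), List.getElem?_drop]
        congr 1; omega
    · have hk0 : k ≠ 0 := by omega
      rw [if_neg (by omega), pvSwapSeg_getElem? vs 0 (k - 1) (by omega) _,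
        if_pos (by omega), List.getElem?_append_right (by simp; omega)]
      have : (vs.take k)[t - (vs.drop k).length]? = vs[t - (vs.drop k).length]? :=
        List.getElem?_take_of_lt (by simp; omega)
      rw [this]
      congr 1; simp; omega
  · rw [if_neg (by omega), List.getElem?_eq_none_iff.mpr (by rw [l2]; omega),
      List.getElem?_eq_none_iff.mpr (by simp; omega)]

theorem pvFold_cast (ps : List Nat) (vs : List Int) (r : List Int) :
    ((ps.map (Nat.cast : Nat → Int)).zip vs).foldl
      (fun res iv => PySem.List.pySetD res iv.1 iv.2) r = pvScatterZ r ps vs := by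
  induction ps generalizing vs r with
  | nil => simp [pvScatterZ]
  | cons p pt ih =>
    cases vs with
    | nil => simp [pvScatterZ]
    | cons v vt =>
      rw [List.map_cons, List.zip_cons_cons, List.foldl_cons, pvScatterZ_cons]
      simpa using ih vt (r.set p v)

-- ===== VERDICT (by name: the statement is the Claim_ definition above) =====
theorem rotateElements_spec : Claim_equal_rotateElements := by
  intro nums k _
  show rotateElements nums k = rotateElements_alt nums k
  have hA := pvPairsN_A nums 0 [] []
  have hB := pvPairsN_B nums 0
  simp only [Nat.cast_zero, List.nil_append] at hA hB
  have hmap : (pvPairsN nums 0).map (fun p => ((p.1 : Int)))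
      = ((pvPairsN nums 0).map Prod.fst).map (Nat.cast : Nat → Int) := by
    rw [List.map_map]; rfl
  simp only [rotateElements, rotateElements_alt, hA, hB, PySem.List.len_eq,
    List.length_map, Nat.cast_eq_zero]
  by_cases hM : (pvPairsN nums 0).length = 0
  · rw [if_pos hM, if_pos hM]
  · rw [if_neg hM, if_neg hM, hmap, pvFold_cast]
    have hnd := pvPairsN_nodup nums 0
    have hbd : ∀ p ∈ (pvPairsN nums 0).map Prod.fst, p < nums.length := by
      intro p hp
      obtain ⟨pv, hpv, rfl⟩ := List.mem_map.mp hp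
      have := (pvPairsN_bounds nums 0 pv hpv).2.1
      omega
    have hlen0 : ((pvPairsN nums 0).map Prod.snd).length
        = ((pvPairsN nums 0).map Prod.fst).length := by simp
    have hself : pvScatterZ nums ((pvPairsN nums 0).map Prod.fst)
        ((pvPairsN nums 0).map Prod.snd) = nums := by
      apply pvScatterZ_self
      intro i h1 h2
      simp only [List.length_map] at h1 h2
      rw [List.getElem_map, List.getElem_map]
      have := (pvPairsN_bounds nums 0 _ (List.getElem_mem h1)).2.2
      simpa using this
    set psN := (pvPairsN nums 0).map Prod.fst with hpsN
    set vs0 := (pvPairsN nums 0).map Prod.snd with hvs0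
    set M := (pvPairsN nums 0).length with hMdef
    have hMpos : 0 < M := Nat.pos_of_ne_zero hM
    have hvl : vs0.length = M := by rw [hvs0]; simp [hMdef]
    have hpl : psN.length = M := by rw [hpsN]; simp [hMdef]
    have hk0 : (0 : Int) ≤ PySem.Int.mod k (M : Int) :=
      PySem.Int.mod_nonneg _ (by exact_mod_cast hMpos)
    have hklt : PySem.Int.mod k (M : Int) < (M : Int) :=
      PySem.Int.mod_lt _ (by exact_mod_cast hMpos)
    have hkN : (PySem.Int.mod k (M : Int)).toNat < M := by omega
    rw [PySem.List.slice_from _ hk0, PySem.List.slice_to _ hk0]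
    have hb1 := pvRevLoop_scatter nums psN vs0 hnd hbd (by rw [hvl, hpl]) 0
      ((PySem.Int.mod k (M : Int)).toNat - 1) (by omega)
    rw [hself] at hb1
    rw [hb1]
    have hb2 := pvRevLoop_scatter nums psN
      (pvSwapSeg vs0 0 ((PySem.Int.mod k (M : Int)).toNat - 1)) hnd hbd
      (by rw [pvSwapSeg_length, hvl, hpl]) ((PySem.Int.mod k (M : Int)).toNat)
      (M - 1) (by omega)
    rw [hb2]
    have hb3 := pvRevLoop_scatter nums psN
      (pvSwapSeg (pvSwapSeg vs0 0 ((PySem.Int.mod k (M : Int)).toNat - 1))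
        ((PySem.Int.mod k (M : Int)).toNat) (M - 1)) hnd hbd
      (by rw [pvSwapSeg_length, pvSwapSeg_length, hvl, hpl]) 0 (M - 1) (by omega)
    rw [hb3]
    have hrot := pvRotation vs0 ((PySem.Int.mod k (M : Int)).toNat) (by omega)
    rw [hvl] at hrot
    rw [hrot]
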